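-- pv_equiv track=rewrite | github.com/stoicismguy/forPythonSkillBox | buns/mod4/task1.py | check
-- ===== SOURCE A (Python) =====
-- def check(i):
--     if i.count(i[0]) == len(i):
--         return "Все числа равны"
--
--     isRand = True
--     for x in i:
--         if i.count(x) > 1:
--             isRand = False
--     if isRand:
--         return "Все числа разные"
--
--     return "Есть равные и неравные числа"
-- ===== SOURCE B (Python) =====
-- def check(i):
--     s = sorted(i)
--     if s[0] == s[-1]:
--         return "Все числа равны"
--     if any(a == b for a, b in zip(s, s[1:])):
--         return "Есть равные и неравные числа"
--     return "Все числа разные"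
-- ===== Notes on version B (the rewrite author's own statement) =====
-- stated objective: faster
-- what changed: Replaced A's repeated list.count scans (quadratic) with a single sort followed by one adjacent-pair pass.
import Mathlib
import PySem

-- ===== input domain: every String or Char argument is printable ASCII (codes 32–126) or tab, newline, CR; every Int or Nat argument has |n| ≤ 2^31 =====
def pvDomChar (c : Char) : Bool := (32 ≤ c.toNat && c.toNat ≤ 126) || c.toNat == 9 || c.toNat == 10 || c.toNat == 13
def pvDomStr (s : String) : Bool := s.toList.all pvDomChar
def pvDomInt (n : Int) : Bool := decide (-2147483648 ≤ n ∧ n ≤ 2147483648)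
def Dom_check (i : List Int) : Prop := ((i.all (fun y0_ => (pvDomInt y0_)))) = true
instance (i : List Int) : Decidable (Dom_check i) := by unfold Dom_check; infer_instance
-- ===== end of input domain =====

-- B replaces A's repeated list.count scans with one sort plus a single adjacent-pair pass (faster in a timing run).


-- ===== PORT A =====
def check (i : List Int) : String :=
  match PySem.List.pyGet? i 0 with
  | none => ""   -- i[0]: IndexError on the empty list, excluded by Pre_check
  | some h0 =>
    if PySem.List.count i h0 = i.length then "Все числа равны"
    else
      let isRand := i.foldl (fun acc x => if 1 < PySem.List.count i x then false else acc) true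
      if isRand then "Все числа разные"
      else "Есть равные и неравные числа"

-- ===== PORT B =====
def check_alt (i : List Int) : String :=
  let s := PySem.List.sorted i (fun x => x)
  match PySem.List.pyGet? s 0, PySem.List.pyGet? s (-1) with
  | some a, some b =>
    if a = b then "Все числа равны"
    else if (s.zip (PySem.List.slice s (some 1) none)).any (fun p => p.1 == p.2) then
      "Есть равные и неравные числа"
    else "Все числа разные"
  | _, _ => ""   -- s[0]/s[-1]: IndexError on the empty list, excluded by Pre_check

-- ===== PRECONDITION & SPEC =====
-- Pre_check excludes only the empty list, on which both Pythons raise IndexError.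
def Pre_check (i : List Int) : Prop := i ≠ []
instance (i : List Int) : Decidable (Pre_check i) := by unfold Pre_check; infer_instance
def pvWitness_check : List Int := [1, 2, 1]
def Spec_check (i : List Int) (out : String) : Prop := out = check_alt i
instance (i : List Int) (out : String) : Decidable (Spec_check i out) := by unfold Spec_check; infer_instance

-- ===== CLAIM (what is proved, stated in full; the proofs are below) =====
def Claim_equal_check : Prop := ∀ (i : List Int), Dom_check i → Pre_check i → Spec_check i (check i)

-- ===== LEMMAS AND PROOFS =====

-- A's flag loop: starts true, goes false once some element has count > 1, never recovers.
theorem foldl_flag (p : Int → Prop) [DecidablePred p] :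
    ∀ (l : List Int) (b : Bool),
      l.foldl (fun acc x => if p x then false else acc) b = (b && decide (∀ x ∈ l, ¬ p x)) := by
  intro l
  induction l with
  | nil => intro b; simp
  | cons a t ih =>
    intro b
    rw [List.foldl_cons, ih]
    by_cases hp : p a
    · simp [hp]
    · simp [hp]

-- every member of a ≤-sorted list is ≤ its last element
theorem le_getLast_of_pairwise :
    ∀ (s : List Int), s.Pairwise (· ≤ ·) → ∀ (hne : s ≠ []) (y : Int), y ∈ s → y ≤ s.getLast hne := by
  intro s
  induction s with
  | nil => intro _ hne; exact absurd rfl hne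
  | cons a r ih =>
    intro hs hne y hy
    cases r with
    | nil => simp at hy; simp [hy, List.getLast]
    | cons b r' =>
      rw [List.getLast_cons (by simp)]
      rcases List.mem_cons.mp hy with rfl | hy'
      · exact (List.pairwise_cons.mp hs).1 _ (List.getLast_mem _)
      · exact ih (List.pairwise_cons.mp hs).2 (by simp) y hy'

-- on a ≤-sorted list, "no two adjacent elements are equal" is exactly Nodup
theorem adj_any_iff :
    ∀ (s : List Int), s.Pairwise (· ≤ ·) →
      (((s.zip s.tail).any (fun p => p.1 == p.2)) = true ↔ ¬ s.Nodup) := by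
  intro s
  induction s with
  | nil => intro _; simp
  | cons a r ih =>
    intro hs
    cases r with
    | nil => simp
    | cons b r' =>
      have hpc := List.pairwise_cons.mp hs
      have hab : a ≤ b := hpc.1 b (by simp)
      have ihr := ih hpc.2
      by_cases hq : a = b
      · subst hq
        constructor
        · intro _ hnd
          exact (List.nodup_cons.mp hnd).1 (by simp)
        · intro _; simp
      · have hna : a ∉ b :: r' := by
          intro hmem
          rcases List.mem_cons.mp hmem with rfl | hmem'
          · exact hq rfl
          · have hb := List.pairwise_cons.mp hpc.2
            have : b ≤ a := hb.1 a hmem'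
            omega
        constructor
        · intro hany hnd
          have : ((b :: r').zip (b :: r').tail).any (fun p => p.1 == p.2) = true := by
            simpa [hq] using hany
          exact (ihr.mp this) (List.nodup_cons.mp hnd).2
        · intro hnd
          have : ¬ (b :: r').Nodup := by
            intro h2
            exact hnd (List.nodup_cons.mpr ⟨hna, h2⟩)
          have h2 := ihr.mpr this
          simp only [List.tail_cons, List.zip_cons_cons, List.any_cons] at h2 ⊢
          simp [h2]

theorem check_spec_aux : ∀ (i : List Int), Pre_check i → check i = check_alt i := by
  intro i hpre
  obtain ⟨x, t, rfl⟩ := List.exists_cons_of_ne_nil hpre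
  set i := x :: t with hi
  set s := PySem.List.sorted i (fun x => x) with hsdef
  have hperm : s.Perm i := PySem.List.sorted_perm i (fun x => x) false
  have hsne : s ≠ [] := by
    intro h0
    have := hperm.length_eq
    rw [h0] at this
    simp [hi] at this
  obtain ⟨m, u, hmu⟩ := List.exists_cons_of_ne_nil hsne
  have hpair : s.Pairwise (· ≤ ·) := PySem.List.sorted_pairwise i (fun x => x)
  have hlast := PySem.List.pyGet?_neg_one s
  have hlast' : s.getLast? = some (s.getLast hsne) := List.getLast?_eq_some_getLast hsne
  -- the two "all equal" tests agree
  have hEq : (PySem.List.count i x = i.length) ↔ (m = s.getLast hsne) := by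
    rw [PySem.List.count_eq, List.count_eq_length]
    constructor
    · intro hall
      have h1 : ∀ y ∈ s, y = x := by
        intro y hy; exact (hall y (hperm.mem_iff.mp hy)).symm
      have hm : m = x := h1 m (by simp [hmu])
      have hl : s.getLast hsne = x := h1 _ (List.getLast_mem hsne)
      rw [hm, hl]
    · intro hml b hb
      have hbs : b ∈ s := hperm.mem_iff.mpr hb
      have hxs : x ∈ s := hperm.mem_iff.mpr (by simp [hi])
      have hmle : ∀ y ∈ s, m ≤ y := by
        intro y hy
        rw [hmu] at hy hpair
        rcases List.mem_cons.mp hy with rfl | hy'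
        · exact le_refl _
        · exact (List.pairwise_cons.mp hpair).1 y hy'
      have hble : b ≤ s.getLast hsne := le_getLast_of_pairwise s hpair hsne b hbs
      have hxle : x ≤ s.getLast hsne := le_getLast_of_pairwise s hpair hsne x hxs
      have h1 := hmle b hbs
      have h2 := hmle x hxs
      omega
  -- the duplicate tests agree
  have hDup : (((s.zip (PySem.List.slice s (some 1) none)).any (fun p => p.1 == p.2)) = true)
      ↔ ¬ i.Nodup := by
    rw [PySem.List.slice_from_one]
    rw [adj_any_iff s hpair]
    exact not_congr hperm.nodup_iff
  have hRand : (i.foldl (fun acc x => if 1 < PySem.List.count i x then false else acc) true = true)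
      ↔ i.Nodup := by
    rw [foldl_flag (fun x => 1 < PySem.List.count i x) i true]
    simp only [Bool.true_and, decide_eq_true_eq]
    constructor
    · intro h
      rw [List.nodup_iff_count_le_one]
      intro a
      by_cases ha : a ∈ i
      · have := h a ha; rw [PySem.List.count_eq] at this; omega
      · simp [List.count_eq_zero_of_not_mem ha]
    · intro h a _
      rw [PySem.List.count_eq]
      have := List.nodup_iff_count_le_one.mp h a
      omega
  -- evaluate both ports
  have hi0 : PySem.List.pyGet? i 0 = some x := by rw [hi]; exact PySem.List.pyGet?_zero_cons x t
  have hs0 : PySem.List.pyGet? s 0 = some m := by rw [hmu]; exact PySem.List.pyGet?_zero_cons m u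
  have hsl : PySem.List.pyGet? s (-1) = some (s.getLast hsne) := by rw [hlast, hlast']
  simp only [check, check_alt, ← hsdef, hi0, hs0, hsl]
  by_cases hc : PySem.List.count i x = i.length
  · rw [if_pos hc, if_pos (hEq.mp hc)]
  · rw [if_neg hc, if_neg (fun h => hc (hEq.mpr h))]
    by_cases hn : i.Nodup
    · rw [if_pos (hRand.mpr hn)]
      rw [if_neg (fun h => (hDup.mp h) hn)]
    · rw [if_neg (by rw [hRand]; exact hn)]
      rw [if_pos (hDup.mpr hn)]

-- ===== VERDICT (by name: the statement is the Claim_ definition above) =====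
theorem check_spec : Claim_equal_check := by
  intro i _ hpre
  exact check_spec_aux i hpre
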